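-- pv_equiv track=rewrite | github.com/ipeterov/random-stuff | Другое/shuffles.py | are_same
-- ===== SOURCE A (Python) =====
-- def are_same(operation1, operation2, arr_len):
--     arr1 = list(range(arr_len))
--     arr2 = list(range(arr_len))
--
--     for swap in operation1:
--         arr1[swap[0]], arr1[swap[1]] = arr1[swap[1]], arr1[swap[0]]
--
--     for swap in operation2:
--         arr2[swap[0]], arr2[swap[1]] = arr2[swap[1]], arr2[swap[0]]
--
--     if arr1 == arr2:
--         return True
--     else:
--         return False
-- ===== SOURCE B (Python) =====
-- def are_same(operation1, operation2, arr_len):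
--     # Single array: apply op1 forward, then op2 in reverse (each swap is its
--     # own inverse), and test whether the composition is the identity.
--     arr = list(range(arr_len))
--     for swap in operation1:
--         arr[swap[0]], arr[swap[1]] = arr[swap[1]], arr[swap[0]]
--     for swap in reversed(list(operation2)):
--         arr[swap[0]], arr[swap[1]] = arr[swap[1]], arr[swap[0]]
--     return arr == list(range(arr_len))
-- ===== Notes on version B (the rewrite author's own statement) =====
-- stated objective: alternative
-- what changed: B keeps a single array, applies operation1 forward and then operation2 in reversed order (each swap is an involution, so this composes p1 with p2's inverse) and tests for the identity permutation, instead of building two arrays and comparing them.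
import Mathlib
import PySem

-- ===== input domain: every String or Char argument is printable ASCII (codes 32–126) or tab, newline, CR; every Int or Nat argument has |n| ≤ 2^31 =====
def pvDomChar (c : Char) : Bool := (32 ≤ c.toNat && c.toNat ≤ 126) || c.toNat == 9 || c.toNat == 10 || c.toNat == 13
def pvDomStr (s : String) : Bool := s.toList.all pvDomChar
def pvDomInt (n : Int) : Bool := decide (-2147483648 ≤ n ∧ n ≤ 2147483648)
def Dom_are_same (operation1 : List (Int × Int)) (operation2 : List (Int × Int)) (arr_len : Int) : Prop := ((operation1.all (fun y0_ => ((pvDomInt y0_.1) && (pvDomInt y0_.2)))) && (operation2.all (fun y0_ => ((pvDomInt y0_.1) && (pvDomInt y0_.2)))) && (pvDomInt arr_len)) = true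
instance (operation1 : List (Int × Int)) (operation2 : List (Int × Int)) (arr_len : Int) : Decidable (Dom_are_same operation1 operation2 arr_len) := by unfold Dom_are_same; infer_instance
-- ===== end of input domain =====

-- B keeps a single array, applying operation1 forward then operation2 reversed (swaps are involutions)
-- and checks for the identity permutation, instead of building two arrays and comparing them (alternative).


-- ===== PORT A =====
-- 'arr[swap[0]], arr[swap[1]] = arr[swap[1]], arr[swap[0]]': the RHS pair is read first,
-- then assigned left to right.  pyGetD/pySetD are the total forms, exact under Pre_ (all
-- indices in range); both Python loops execute this very line, so both ports use this helper.
def pySwap (arr : List Int) (swap : Int × Int) : List Int :=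
  PySem.List.pySetD (PySem.List.pySetD arr swap.1 (PySem.List.pyGetD arr swap.2 0))
    swap.2 (PySem.List.pyGetD arr swap.1 0)

def are_same (operation1 : List (Int × Int)) (operation2 : List (Int × Int)) (arr_len : Int) : Bool :=
  let arr1 := PySem.List.pyRange 0 arr_len 1
  let arr2 := PySem.List.pyRange 0 arr_len 1
  let arr1 := operation1.foldl pySwap arr1
  let arr2 := operation2.foldl pySwap arr2
  if arr1 == arr2 then true else false

-- ===== PORT B =====
def are_same_alt (operation1 : List (Int × Int)) (operation2 : List (Int × Int)) (arr_len : Int) : Bool :=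
  let arr := PySem.List.pyRange 0 arr_len 1
  let arr := operation1.foldl pySwap arr
  let arr := (operation2.reverse).foldl pySwap arr
  arr == PySem.List.pyRange 0 arr_len 1

-- ===== PRECONDITION & SPEC =====
-- Pre_ excludes exactly the inputs where Python A raises IndexError: some swap index out of range.
def Pre_are_same (operation1 : List (Int × Int)) (operation2 : List (Int × Int)) (arr_len : Int) : Prop :=
  ∀ s ∈ operation1 ++ operation2,
    PySem.Raise.InRange arr_len.toNat s.1 ∧ PySem.Raise.InRange arr_len.toNat s.2
instance (operation1 : List (Int × Int)) (operation2 : List (Int × Int)) (arr_len : Int) : Decidable (Pre_are_same operation1 operation2 arr_len) := by unfold Pre_are_same; infer_instance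
def pvWitness_are_same : (List (Int × Int)) × (List (Int × Int)) × Int := ([(0, 2), (1, -1)], [(2, 1)], 3)

def Spec_are_same (operation1 : List (Int × Int)) (operation2 : List (Int × Int)) (arr_len : Int) (out : Bool) : Prop := out = are_same_alt operation1 operation2 arr_len
instance (operation1 : List (Int × Int)) (operation2 : List (Int × Int)) (arr_len : Int) (out : Bool) : Decidable (Spec_are_same operation1 operation2 arr_len out) := by unfold Spec_are_same; infer_instance

-- ===== CLAIM (what is proved, stated in full; the proofs are below) =====
def Claim_equal_are_same : Prop := ∀ (operation1 : List (Int × Int)) (operation2 : List (Int × Int)) (arr_len : Int), Dom_are_same operation1 operation2 arr_len → Pre_are_same operation1 operation2 arr_len → Spec_are_same operation1 operation2 arr_len (are_same operation1 operation2 arr_len)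

-- ===== LEMMAS AND PROOFS =====

-- normalised index of a Python index i into a list of length n (meaningful under InRange)
def pvNorm (n : Nat) (i : Int) : Nat := if i < 0 then (i + n).toNat else i.toNat

theorem pvNorm_lt {n : Nat} {i : Int} (h : PySem.Raise.InRange n i) : pvNorm n i < n := by
  rcases h with ⟨h1, h2⟩; unfold pvNorm; split <;> omega

theorem pyIdx?_eq {n : Nat} {i : Int} (h : PySem.Raise.InRange n i) :
    PySem.List.pyIdx? n i = some (pvNorm n i) := by
  rcases h with ⟨h1, h2⟩
  simp only [PySem.List.pyIdx?, pvNorm]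
  split_ifs <;> simp_all <;> omega

theorem pyGetD_eq {xs : List Int} {i : Int} (h : PySem.Raise.InRange xs.length i) (d : Int) :
    PySem.List.pyGetD xs i d = xs.getD (pvNorm xs.length i) d := by
  have hl := pvNorm_lt h
  rcases h with ⟨h1, h2⟩
  by_cases h0 : 0 ≤ i
  · rw [PySem.List.pyGetD_eq_getElem xs d h0 h2, List.getD_eq_getElem xs d hl]
    congr 1; unfold pvNorm; split <;> omega
  · push Not at h0
    have hk : 0 < (-i).toNat := by omega
    have hk' : (-i).toNat ≤ xs.length := by omega
    have := PySem.List.pyGetD_neg_natCast xs (-i).toNat d hk hk'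
    rw [show (-((-i).toNat : Int)) = i by omega] at this
    rw [this, List.getD_eq_getElem xs d hl]
    congr 1; unfold pvNorm; split <;> omega

theorem pySetD_eq {xs : List Int} {i : Int} (h : PySem.Raise.InRange xs.length i) (v : Int) :
    PySem.List.pySetD xs i v = xs.set (pvNorm xs.length i) v := by
  simp only [PySem.List.pySetD, PySem.List.pySet?, pyIdx?_eq h, Option.map_some, Option.getD_some]

-- nat-index version of the swap
def natSwap (arr : List Int) (i j : Nat) : List Int :=
  (arr.set i (arr.getD j 0)).set j (arr.getD i 0)

theorem length_natSwap (arr : List Int) (i j : Nat) : (natSwap arr i j).length = arr.length := by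
  simp [natSwap]

theorem pySwap_eq_natSwap {arr : List Int} {s : Int × Int}
    (h1 : PySem.Raise.InRange arr.length s.1) (h2 : PySem.Raise.InRange arr.length s.2) :
    pySwap arr s = natSwap arr (pvNorm arr.length s.1) (pvNorm arr.length s.2) := by
  have hlen : (PySem.List.pySetD arr s.1 (PySem.List.pyGetD arr s.2 0)).length = arr.length := by
    rw [pySetD_eq h1]; simp
  unfold pySwap natSwap
  rw [pyGetD_eq h2, pyGetD_eq h1, pySetD_eq h1]
  have h2' : PySem.Raise.InRange (arr.set (pvNorm arr.length s.1) (arr.getD (pvNorm arr.length s.2) 0)).length s.2 := by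
    simpa using h2
  rw [pySetD_eq h2']
  simp

theorem length_pySwap {arr : List Int} {s : Int × Int}
    (h1 : PySem.Raise.InRange arr.length s.1) (h2 : PySem.Raise.InRange arr.length s.2) :
    (pySwap arr s).length = arr.length := by
  rw [pySwap_eq_natSwap h1 h2, length_natSwap]

theorem natSwap_natSwap {arr : List Int} {i j : Nat} (hi : i < arr.length) (hj : j < arr.length) :
    natSwap (natSwap arr i j) i j = arr := by
  apply List.ext_getElem
  · simp [natSwap]
  · intro k hk _
    simp only [natSwap, List.getD_eq_getElem?_getD, List.getElem?_set,
      List.getElem_set] at *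
    by_cases hkj : k = j <;> by_cases hki : k = i <;> by_cases hij : i = j <;>
      simp_all

-- validity of all swaps in a list, wrt an array length
def ValidOps (n : Nat) (l : List (Int × Int)) : Prop :=
  ∀ s ∈ l, PySem.Raise.InRange n s.1 ∧ PySem.Raise.InRange n s.2

theorem pySwap_pySwap {arr : List Int} {s : Int × Int}
    (h1 : PySem.Raise.InRange arr.length s.1) (h2 : PySem.Raise.InRange arr.length s.2) :
    pySwap (pySwap arr s) s = arr := by
  have e := pySwap_eq_natSwap h1 h2
  have h1' : PySem.Raise.InRange (pySwap arr s).length s.1 := by rw [length_pySwap h1 h2]; exact h1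
  have h2' : PySem.Raise.InRange (pySwap arr s).length s.2 := by rw [length_pySwap h1 h2]; exact h2
  rw [pySwap_eq_natSwap h1' h2', length_pySwap h1 h2, e,
    natSwap_natSwap (pvNorm_lt h1) (pvNorm_lt h2)]

theorem length_foldl_pySwap {l : List (Int × Int)} {arr : List Int}
    (h : ValidOps arr.length l) : (l.foldl pySwap arr).length = arr.length := by
  induction l generalizing arr with
  | nil => rfl
  | cons s t ih =>
    have hs := h s (List.mem_cons_self)
    have hl := length_pySwap hs.1 hs.2
    simp only [List.foldl_cons]
    rw [ih (by rw [hl]; exact fun x hx => h x (List.mem_cons_of_mem _ hx)), hl]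

theorem undo1 {l : List (Int × Int)} {arr : List Int} (h : ValidOps arr.length l) :
    l.reverse.foldl pySwap (l.foldl pySwap arr) = arr := by
  induction l generalizing arr with
  | nil => rfl
  | cons s t ih =>
    have hs := h s (List.mem_cons_self)
    have hl := length_pySwap hs.1 hs.2
    have ht : ValidOps (pySwap arr s).length t := by
      rw [hl]; exact fun x hx => h x (List.mem_cons_of_mem _ hx)
    simp only [List.reverse_cons, List.foldl_cons, List.foldl_append, List.foldl_cons,
      List.foldl_nil]
    rw [ih ht, pySwap_pySwap hs.1 hs.2]

theorem undo2 {l : List (Int × Int)} {arr : List Int} (h : ValidOps arr.length l) :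
    l.foldl pySwap (l.reverse.foldl pySwap arr) = arr := by
  induction l generalizing arr with
  | nil => rfl
  | cons s t ih =>
    have hs := h s (List.mem_cons_self)
    have ht : ValidOps arr.length t := fun x hx => h x (List.mem_cons_of_mem _ hx)
    have hlen : (t.reverse.foldl pySwap arr).length = arr.length := by
      have : ValidOps arr.length t.reverse := fun x hx => ht x (List.mem_reverse.mp hx)
      exact length_foldl_pySwap this
    have hs1 : PySem.Raise.InRange (t.reverse.foldl pySwap arr).length s.1 := by
      rw [hlen]; exact hs.1
    have hs2 : PySem.Raise.InRange (t.reverse.foldl pySwap arr).length s.2 := by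
      rw [hlen]; exact hs.2
    simp only [List.reverse_cons, List.foldl_append, List.foldl_cons, List.foldl_nil]
    rw [pySwap_pySwap hs1 hs2, ih ht]

-- ===== VERDICT (by name: the statement is the Claim_ definition above) =====
theorem are_same_spec : Claim_equal_are_same := by
  intro op1 op2 n _ hpre
  unfold Spec_are_same are_same are_same_alt
  have hlenr : (PySem.List.pyRange 0 n 1).length = n.toNat := by
    rw [PySem.List.length_pyRange_one]; norm_num
  have h1 : ValidOps (PySem.List.pyRange 0 n 1).length op1 := by
    rw [hlenr]; exact fun s hs => hpre s (List.mem_append_left _ hs)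
  have h2 : ValidOps (PySem.List.pyRange 0 n 1).length op2 := by
    rw [hlenr]; exact fun s hs => hpre s (List.mem_append_right _ hs)
  simp only []
  set r := PySem.List.pyRange 0 n 1 with hr
  have hlen1 : (op1.foldl pySwap r).length = r.length := length_foldl_pySwap h1
  have h2' : ValidOps (op1.foldl pySwap r).length op2 := by rw [hlen1]; exact h2
  have key : op2.reverse.foldl pySwap (op1.foldl pySwap r) = r ↔
      op1.foldl pySwap r = op2.foldl pySwap r := by
    constructor
    · intro h
      have := undo2 (l := op2) (arr := op1.foldl pySwap r) h2'
      rw [h] at this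
      exact this.symm
    · intro h
      rw [h]
      exact undo1 h2
  by_cases hc : op1.foldl pySwap r = op2.foldl pySwap r
  · rw [if_pos (beq_iff_eq.mpr hc), eq_comm, beq_iff_eq]
    exact key.mpr hc
  · rw [if_neg (fun h => hc (beq_iff_eq.mp h)), eq_comm, beq_eq_false_iff_ne]
    exact fun h => hc (key.mp h)
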